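-- pv_equiv track=rewrite | github.com/lee-geyer/doc-processing | src/core/chunking.py | _extract_section_from_position
-- ===== SOURCE A (Python) =====
-- from typing import List, Dict, Any, Optional, Tuple
--
-- def _extract_section_from_position(
--     start_pos: int, end_pos: int, full_text: str
-- ) -> Dict[str, Optional[str]]:
--     """Extract section information based on chunk position."""
--     # Look backwards from chunk start to find section headers
--     preceding_text = full_text[:start_pos]
--
--     # Simple header detection (this could be more sophisticated)
--     lines = preceding_text.split('\n')
--     section = None
--     subsection = None
--
--     for line in reversed(lines):
--         line = line.strip()
--         if line and line.isupper() and len(line) < 100: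
--             if subsection is None:
--                 subsection = line
--             elif section is None:
--                 section = line
--                 break
--
--     return {"section": section, "subsection": subsection}
-- ===== SOURCE B (Python) =====
-- def _extract_section_from_position(start_pos, end_pos, full_text):
--     """Extract section information based on chunk position."""
--     matches = [s for s in (ln.strip() for ln in full_text[:start_pos].split('\n'))
--                if s and s.isupper() and len(s) < 100]
--     return {
--         "section": matches[-2] if len(matches) >= 2 else None,
--         "subsection": matches[-1] if matches else None,
--     }
-- ===== Notes on version B (the rewrite author's own statement) =====
-- stated objective: simpler
-- what changed: Replaces the reverse scan with mutable section/subsection state and an early break by a single forward filter of the stripped lines followed by indexing the last two matches (matches[-1]/matches[-2]).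
import Mathlib
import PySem

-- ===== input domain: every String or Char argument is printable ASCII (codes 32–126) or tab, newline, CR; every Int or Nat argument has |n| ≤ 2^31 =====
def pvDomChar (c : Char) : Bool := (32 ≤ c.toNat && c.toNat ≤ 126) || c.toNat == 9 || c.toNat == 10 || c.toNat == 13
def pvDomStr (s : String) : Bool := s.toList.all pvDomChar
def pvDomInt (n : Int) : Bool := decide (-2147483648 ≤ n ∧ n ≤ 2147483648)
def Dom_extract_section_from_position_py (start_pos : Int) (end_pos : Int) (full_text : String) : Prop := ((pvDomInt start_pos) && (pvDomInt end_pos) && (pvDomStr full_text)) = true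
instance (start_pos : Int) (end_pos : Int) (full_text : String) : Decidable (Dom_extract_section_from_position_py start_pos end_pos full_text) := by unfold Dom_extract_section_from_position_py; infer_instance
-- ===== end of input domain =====

-- B replaces A's reverse scan with mutable state and an early break by a forward
-- filter of the stripped lines followed by indexing the last two matches_ (simpler).

-- shared helper: Python's `s and s.isupper() and len(s) < 100` on a stripped line.
-- str.isupper() = at least one cased char and no lowercase cased char; exact on the
-- ASCII domain, where the cased characters are exactly the letters.
def pvIsHeader (s : String) : Bool :=
  !(s == "") && (s.toList.any PySem.Chars.isupper && s.toList.all (fun c => !PySem.Chars.islower c))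
    && decide (PySem.Str.len s < 100)

-- ===== PORT A =====
-- the `for line in reversed(lines)` loop with its section/subsection state and break
def pvLoopA : List String → Option String → Option String → Option String × Option String
  | [], section_, subsection => (section_, subsection)
  | l :: rest, section_, subsection =>
    let line := PySem.Str.strip l
    if pvIsHeader line then
      match subsection with
      | none => pvLoopA rest section_ (some line)
      | some _ =>
        match section_ with
        | none => (some line, subsection)      -- break
        | some _ => pvLoopA rest section_ subsection
    else pvLoopA rest section_ subsection

def extract_section_from_position_py (start_pos : Int) (end_pos : Int) (full_text : String) : List (String × Option String) :=
  let preceding_text := PySem.Str.slice full_text none (some start_pos)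
  let lines := (PySem.Str.split? preceding_text "\n").getD []
  let r := pvLoopA lines.reverse none none
  [("section", r.1), ("subsection", r.2)]

-- ===== PORT B =====
def extract_section_from_position_py_alt (start_pos : Int) (end_pos : Int) (full_text : String) : List (String × Option String) :=
  let matches_ :=
    (((PySem.Str.split? (PySem.Str.slice full_text none (some start_pos)) "\n").getD []).map
        PySem.Str.strip).filter pvIsHeader
  [("section", if 2 ≤ matches_.length then PySem.List.pyGet? matches_ (-2) else none),
   ("subsection", if matches_ ≠ [] then PySem.List.pyGet? matches_ (-1) else none)]

-- ===== PRECONDITION & SPEC =====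
def Spec_extract_section_from_position_py (start_pos : Int) (end_pos : Int) (full_text : String) (out : List (String × Option String)) : Prop := out = extract_section_from_position_py_alt start_pos end_pos full_text
instance (start_pos : Int) (end_pos : Int) (full_text : String) (out : List (String × Option String)) : Decidable (Spec_extract_section_from_position_py start_pos end_pos full_text out) := by unfold Spec_extract_section_from_position_py; infer_instance

-- ===== CLAIM (what is proved, stated in full; the proofs are below) =====
def Claim_equal_extract_section_from_position_py : Prop := ∀ (start_pos : Int) (end_pos : Int) (full_text : String), Dom_extract_section_from_position_py start_pos end_pos full_text → Spec_extract_section_from_position_py start_pos end_pos full_text (extract_section_from_position_py start_pos end_pos full_text)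

-- ===== LEMMAS AND PROOFS =====

-- with subsection already set (and section not), the loop returns the first further match
theorem pvLoopA_some (ls : List String) (s : String) :
    pvLoopA ls none (some s) =
      (((ls.map PySem.Str.strip).filter pvIsHeader)[0]?, some s) := by
  induction ls with
  | nil => simp [pvLoopA]
  | cons l rest ih =>
    simp only [pvLoopA, List.map_cons, List.filter_cons]
    by_cases h : pvIsHeader (PySem.Str.strip l)
    · simp [h]
    · simp [h, ih]

theorem pvLoopA_none (ls : List String) :
    pvLoopA ls none none =
      (((ls.map PySem.Str.strip).filter pvIsHeader)[1]?,
       ((ls.map PySem.Str.strip).filter pvIsHeader)[0]?) := by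
  induction ls with
  | nil => simp [pvLoopA]
  | cons l rest ih =>
    simp only [pvLoopA, List.map_cons, List.filter_cons]
    by_cases h : pvIsHeader (PySem.Str.strip l)
    · simp [h, pvLoopA_some]
    · simp [h, ih]

-- A's reverse-scan result expressed by the last two elements of the forward match list
theorem pvTail_eq (M : List String) :
    (M.reverse[0]? = if M ≠ [] then PySem.List.pyGet? M (-1) else none) ∧
    (M.reverse[1]? = if 2 ≤ M.length then PySem.List.pyGet? M (-2) else none) := by
  constructor
  · by_cases h : M = []
    · simp [h]
    · rw [if_pos h, PySem.List.pyGet?_neg_one]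
      rcases M.eq_nil_or_concat with rfl | ⟨ys, y, rfl⟩
      · simp
      · simp
  · by_cases h : 2 ≤ M.length
    · rw [if_pos h, PySem.List.pyGet?_neg_ofNat M 2 (by omega) h,
        List.getElem?_reverse (by omega), show M.length - 1 - 1 = M.length - 2 from by omega]
    · rw [if_neg h, List.getElem?_eq_none (by simp; omega)]

-- ===== VERDICT (by name: the statement is the Claim_ definition above) =====
theorem extract_section_from_position_py_spec : Claim_equal_extract_section_from_position_py := by
  intro start_pos end_pos full_text _
  unfold Spec_extract_section_from_position_py extract_section_from_position_py
    extract_section_from_position_py_alt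
  simp only [pvLoopA_none, List.map_reverse, List.filter_reverse]
  rcases pvTail_eq ((((PySem.Str.split? (PySem.Str.slice full_text none (some start_pos))
      "\n").getD []).map PySem.Str.strip).filter pvIsHeader) with ⟨h0, h1⟩
  rw [h0, h1]
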